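-- pv_equiv track=rewrite | github.com/chanwooyang1/Algorithm | 프로그래머스/0/181884. n보다 커질 때까지 더하기/n보다 커질 때까지 더하기.py | solution
-- ===== SOURCE A (Python) =====
-- def solution(numbers, n):
--     answer = 0
--     for number in numbers:
--         if answer > n:
--             break
--         else:
--             answer += number
--     return answer
-- ===== SOURCE B (Python) =====
-- def solution(numbers, n):
--     sums = [0]
--     for x in numbers:
--         sums.append(sums[-1] + x)
--     for s in sums:
--         if s > n:
--             return s
--     return sums[-1]
-- ===== Notes on version B (the rewrite author's own statement) =====
-- stated objective: alternative
-- what changed: B first materializes the full list of prefix sums (seeded with 0) and then separately scans it for the first value strictly greater than n, defaulting to the total, instead of A's fused accumulate-and-break loop.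
import Mathlib
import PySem

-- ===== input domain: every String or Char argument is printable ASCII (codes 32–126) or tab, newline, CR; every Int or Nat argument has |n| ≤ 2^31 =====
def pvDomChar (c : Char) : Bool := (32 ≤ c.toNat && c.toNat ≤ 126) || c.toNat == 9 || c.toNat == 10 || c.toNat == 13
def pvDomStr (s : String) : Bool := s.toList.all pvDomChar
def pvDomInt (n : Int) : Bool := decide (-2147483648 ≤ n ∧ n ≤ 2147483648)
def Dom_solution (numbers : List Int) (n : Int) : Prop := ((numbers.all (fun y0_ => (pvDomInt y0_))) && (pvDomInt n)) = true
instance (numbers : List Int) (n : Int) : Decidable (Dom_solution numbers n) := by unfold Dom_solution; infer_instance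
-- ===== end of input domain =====

-- ===== PORT A =====
-- Loop over numbers: break (return acc) once acc > n, else add the element.
def solLoop (n : Int) : List Int → Int → Int
  | [], acc => acc
  | x :: xs, acc => if acc > n then acc else solLoop n xs (acc + x)

def solution (numbers : List Int) (n : Int) : Int := solLoop n numbers 0

-- ===== PORT B =====
-- Alternative decomposition: build the full prefix-sum list seeded with 0,
-- then scan it for the first value > n, defaulting to its last element (the total).
def bSums : List Int → List Int → List Int
  | [], sums => sums
  | x :: xs, sums => bSums xs (sums ++ [sums.getLastD 0 + x])

def solution_alt (numbers : List Int) (n : Int) : Int :=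
  let sums := bSums numbers [0]
  match sums.find? (fun s => decide (s > n)) with
  | some s => s
  | none => sums.getLastD 0

-- ===== PRECONDITION & SPEC =====
def Spec_solution (numbers : List Int) (n : Int) (out : Int) : Prop := out = solution_alt numbers n
instance (numbers : List Int) (n : Int) (out : Int) : Decidable (Spec_solution numbers n out) := by unfold Spec_solution; infer_instance

-- ===== CLAIM (what is proved, stated in full; the proofs are below) =====
def Claim_equal_solution : Prop := ∀ (numbers : List Int) (n : Int), Dom_solution numbers n → Spec_solution numbers n (solution numbers n)

-- ===== LEMMAS AND PROOFS =====


-- bSums appends the scanl of the remaining elements after the prefix built so far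
theorem bSums_eq_scanl (xs pre : List Int) (acc : Int) :
    bSums xs (pre ++ [acc]) = pre ++ List.scanl (· + ·) acc xs := by
  induction xs generalizing pre acc with
  | nil => simp [bSums, List.scanl]
  | cons x xs ih =>
    have h : (pre ++ [acc]).getLastD 0 = acc := by simp
    calc bSums (x :: xs) (pre ++ [acc])
        = bSums xs ((pre ++ [acc]) ++ [acc + x]) := by simp [bSums, h]
      _ = (pre ++ [acc]) ++ List.scanl (· + ·) (acc + x) xs := ih (pre ++ [acc]) (acc + x)
      _ = pre ++ List.scanl (· + ·) acc (x :: xs) := by simp [List.scanl]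

-- A's break-loop equals "first prefix sum > n, else the last prefix sum"
theorem solLoop_eq (n : Int) (xs : List Int) (acc : Int) :
    solLoop n xs acc =
      (match (List.scanl (· + ·) acc xs).find? (fun s => decide (s > n)) with
       | some s => s
       | none => (List.scanl (· + ·) acc xs).getLastD 0) := by
  induction xs generalizing acc with
  | nil =>
    simp only [List.scanl, List.find?, solLoop]
    by_cases h : acc > n <;> simp [h]
  | cons x xs ih =>
    rw [List.scanl_cons, solLoop]
    by_cases h : acc > n
    · simp [List.find?_cons, h]
    · rw [if_neg h, ih (acc + x),
        List.find?_cons_of_neg (p := fun s => decide (s > n)) (by simpa using h)]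
      rcases hs : List.scanl (· + ·) (acc + x) xs with _ | ⟨b, l⟩
      · cases xs <;> simp [List.scanl, List.scanl_cons] at hs
      · cases hf : (b :: l).find? (fun s => decide (s > n)) <;>
          simp [hf, List.getLastD_cons]

-- ===== VERDICT (by name: the statement is the Claim_ definition above) =====
theorem solution_spec : Claim_equal_solution := by
  intro numbers n _
  unfold Spec_solution solution solution_alt
  have hb : bSums numbers [0] = List.scanl (· + ·) 0 numbers := by
    simpa using bSums_eq_scanl numbers [] 0
  rw [hb, solLoop_eq]
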